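-- pv_equiv track=rewrite | github.com/TheIIIrd/magic-prism | src/commands_list/utils.py | filter_pkg_managers
-- ===== SOURCE A (Python) =====
-- def filter_pkg_managers(found_managers):
--     """Фильтрует ненужные пакетные менеджеры из списка.
--
--     Args:
--         found_managers (list): Список найденных пакетных менеджеров.
--
--     Returns:
--         list: Отфильтрованный список пакетных менеджеров.
--     """
--     if "epm" in found_managers:
--         found_managers = [
--             m
--             for m in found_managers
--             if m
--             not in [
--                 "flatpak",
--                 "dnf",
--                 "apt",
--                 "apt-get",
--                 "rpm",
--                 "dpkg",
--             ]
--         ]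
--
--     if "apt" in found_managers:
--         found_managers = [
--             m
--             for m in found_managers
--             if m
--             not in [
--                 "apt-get",
--                 "dpkg",
--             ]
--         ]
--
--     if "paru" in found_managers:
--         found_managers = [
--             m
--             for m in found_managers
--             if m
--             not in [
--                 "yay",
--                 "pacman",
--             ]
--         ]
--
--     if "yay" in found_managers:
--         found_managers = [
--             m
--             for m in found_managers
--             if m
--             not in [
--                 "pacman",
--             ]
--         ]
--
--     return found_managers
-- ===== SOURCE B (Python) =====
-- def filter_pkg_managers(found_managers):
--     """Фильтрует ненужные пакетные менеджеры из списка."""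
--     removed = set()
--     if "epm" in found_managers:
--         removed.update(["flatpak", "dnf", "apt", "apt-get", "rpm", "dpkg"])
--     if "apt" in found_managers:
--         removed.update(["apt-get", "dpkg"])
--     if "paru" in found_managers:
--         removed.update(["yay", "pacman"])
--     if "yay" in found_managers:
--         removed.add("pacman")
--     return [m for m in found_managers if m not in removed]
-- ===== Notes on version B (the rewrite author's own statement) =====
-- stated objective: simpler
-- what changed: Replaces the four sequential filter-and-rebind passes with one removal set computed by checking each trigger once against the original list (safe because no trigger is in any blacklist and overlapping blacklists are nested), followed by a single filtering pass.
import Mathlib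
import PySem

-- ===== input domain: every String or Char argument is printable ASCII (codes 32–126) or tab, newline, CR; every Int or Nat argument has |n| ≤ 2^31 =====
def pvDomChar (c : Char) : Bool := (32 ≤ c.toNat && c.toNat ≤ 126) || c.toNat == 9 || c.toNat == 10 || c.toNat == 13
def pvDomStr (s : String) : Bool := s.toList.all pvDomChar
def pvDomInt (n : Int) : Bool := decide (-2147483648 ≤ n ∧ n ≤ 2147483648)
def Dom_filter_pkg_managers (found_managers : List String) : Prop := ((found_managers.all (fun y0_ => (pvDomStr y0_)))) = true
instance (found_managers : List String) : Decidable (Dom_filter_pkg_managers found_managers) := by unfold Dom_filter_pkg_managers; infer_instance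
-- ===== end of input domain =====

-- B replaces A's four sequential filter-and-rebind passes with one removal set built by
-- checking each trigger once against the original list, then a single filtering pass (objective: simpler).

-- ===== PORT A =====
def filter_pkg_managers (found_managers : List String) : List String :=
  let fm1 := if found_managers.contains "epm" then
      found_managers.filter (fun m => !(["flatpak", "dnf", "apt", "apt-get", "rpm", "dpkg"].contains m))
    else found_managers
  let fm2 := if fm1.contains "apt" then
      fm1.filter (fun m => !(["apt-get", "dpkg"].contains m))
    else fm1
  let fm3 := if fm2.contains "paru" then
      fm2.filter (fun m => !(["yay", "pacman"].contains m))
    else fm2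
  let fm4 := if fm3.contains "yay" then
      fm3.filter (fun m => !(["pacman"].contains m))
    else fm3
  fm4

-- ===== PORT B =====
def filter_pkg_managers_alt (found_managers : List String) : List String :=
  let removed : PySem.Set String := PySem.Set.empty
  let removed := if found_managers.contains "epm" then
      PySem.Set.update removed ["flatpak", "dnf", "apt", "apt-get", "rpm", "dpkg"] else removed
  let removed := if found_managers.contains "apt" then
      PySem.Set.update removed ["apt-get", "dpkg"] else removed
  let removed := if found_managers.contains "paru" then
      PySem.Set.update removed ["yay", "pacman"] else removed
  let removed := if found_managers.contains "yay" then
      PySem.Set.add removed "pacman" else removed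
  found_managers.filter (fun m => !(PySem.Set.contains removed m))

-- ===== PRECONDITION & SPEC =====
def Spec_filter_pkg_managers (found_managers : List String) (out : List String) : Prop := out = filter_pkg_managers_alt found_managers
instance (found_managers : List String) (out : List String) : Decidable (Spec_filter_pkg_managers found_managers out) := by unfold Spec_filter_pkg_managers; infer_instance

-- ===== CLAIM (what is proved, stated in full; the proofs are below) =====
def Claim_equal_filter_pkg_managers : Prop := ∀ (found_managers : List String), Dom_filter_pkg_managers found_managers → Spec_filter_pkg_managers found_managers (filter_pkg_managers found_managers)

-- ===== LEMMAS AND PROOFS =====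

-- ===== VERDICT (by name: the statement is the Claim_ definition above) =====
theorem filter_pkg_managers_spec : Claim_equal_filter_pkg_managers := by
  intro fm _
  unfold Spec_filter_pkg_managers filter_pkg_managers filter_pkg_managers_alt
  by_cases he : "epm" ∈ fm <;> by_cases ha : "apt" ∈ fm <;>
    by_cases hp : "paru" ∈ fm <;> by_cases hy : "yay" ∈ fm <;>
    simp [he, ha, hp, hy, List.filter_filter, PySem.Set.update, PySem.Set.add,
      PySem.Set.empty, PySem.Set.contains, List.mem_filter] <;>
    (first
      | rfl
      | (refine List.filter_congr fun x hx => ?_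
         rw [Bool.eq_iff_iff]
         simp
         tauto))
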